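-- pv_equiv track=rewrite | github.com/augmentac/ff2api-tool | src/frontend/app.py | _make_error_user_friendly
-- ===== SOURCE A (Python) =====
-- def _make_error_user_friendly(error_str):
--     """Convert technical error messages to user-friendly ones"""
--
--     # Field name mappings for user-friendly descriptions
--     field_mappings = {
--         'load.loadNumber': 'Load Number',
--         'load.mode': 'Transportation Mode (FTL/LTL)',
--         'load.rateType': 'Rate Type (Spot/Contract)',
--         'load.status': 'Load Status',
--         'load.route.0.address.street1': 'Pickup Address',
--         'load.route.0.address.city': 'Pickup City',
--         'load.route.0.address.stateOrProvince': 'Pickup State',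
--         'load.route.0.address.postalCode': 'Pickup ZIP Code',
--         'load.route.0.address.country': 'Pickup Country',
--         'load.route.0.expectedArrivalWindowStart': 'Pickup Date/Time',
--         'load.route.0.expectedArrivalWindowEnd': 'Pickup Window End',
--         'load.route.1.address.street1': 'Delivery Address',
--         'load.route.1.address.city': 'Delivery City',
--         'load.route.1.address.stateOrProvince': 'Delivery State',
--         'load.route.1.address.postalCode': 'Delivery ZIP Code',
--         'load.route.1.expectedArrivalWindowStart': 'Delivery Date/Time',
--         'customer.customerId': 'Customer ID',
--         'customer.name': 'Customer Name',
--         'load.items.0.quantity': 'Item Quantity',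
--         'load.items.0.totalWeightLbs': 'Total Weight (lbs)',
--         'bidCriteria.targetCostUsd': 'Target Cost ($)',
--         'carrier.name': 'Carrier Name',
--         'carrier.dotNumber': 'DOT Number',
--         'carrier.mcNumber': 'MC Number'
--     }
--
--     # Replace technical field names with user-friendly ones
--     user_friendly = error_str
--     for technical_name, friendly_name in field_mappings.items():
--         if technical_name in user_friendly:
--             user_friendly = user_friendly.replace(technical_name, friendly_name)
--
--     # Make other improvements
--     user_friendly = user_friendly.replace("Missing required field:", "Missing:")
--     user_friendly = user_friendly.replace("Invalid value", "Invalid value in")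
--     user_friendly = user_friendly.replace("Valid values:", "Accepted values:")
--
--     return user_friendly
-- ===== SOURCE B (Python) =====
-- import re
--
-- # Field-name table kept as 'technical=friendly' lines, parsed once at import time.
-- _TABLE = [
--     'load.loadNumber=Load Number',
--     'load.mode=Transportation Mode (FTL/LTL)',
--     'load.rateType=Rate Type (Spot/Contract)',
--     'load.status=Load Status',
--     'load.route.0.address.street1=Pickup Address',
--     'load.route.0.address.city=Pickup City',
--     'load.route.0.address.stateOrProvince=Pickup State',
--     'load.route.0.address.postalCode=Pickup ZIP Code',
--     'load.route.0.address.country=Pickup Country',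
--     'load.route.0.expectedArrivalWindowStart=Pickup Date/Time',
--     'load.route.0.expectedArrivalWindowEnd=Pickup Window End',
--     'load.route.1.address.street1=Delivery Address',
--     'load.route.1.address.city=Delivery City',
--     'load.route.1.address.stateOrProvince=Delivery State',
--     'load.route.1.address.postalCode=Delivery ZIP Code',
--     'load.route.1.expectedArrivalWindowStart=Delivery Date/Time',
--     'customer.customerId=Customer ID',
--     'customer.name=Customer Name',
--     'load.items.0.quantity=Item Quantity',
--     'load.items.0.totalWeightLbs=Total Weight (lbs)',
--     'bidCriteria.targetCostUsd=Target Cost ($)',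
--     'carrier.name=Carrier Name',
--     'carrier.dotNumber=DOT Number',
--     'carrier.mcNumber=MC Number',
-- ]
--
-- _FIELD_MAPPINGS = {}
-- for _line in _TABLE:
--     _key, _, _value = _line.partition('=')
--     _FIELD_MAPPINGS[_key] = _value
--
-- # One compiled alternation over all technical field names; one left-to-right pass.
-- # No sorting is needed: no field name is a prefix of another, so at any position
-- # at most one alternative can match and alternative order is irrelevant.
-- _FIELD_RE = re.compile('|'.join(re.escape(k) for k in _FIELD_MAPPINGS))
--
--
-- def _make_error_user_friendly(error_str):
--     """Convert technical error messages to user-friendly ones"""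
--     user_friendly = _FIELD_RE.sub(lambda m: _FIELD_MAPPINGS[m.group(0)], error_str)
--
--     user_friendly = user_friendly.replace("Missing required field:", "Missing:")
--     user_friendly = user_friendly.replace("Invalid value", "Invalid value in")
--     user_friendly = user_friendly.replace("Valid values:", "Accepted values:")
--
--     return user_friendly
-- ===== Notes on version B (the rewrite author's own statement) =====
-- stated objective: alternative
-- what changed: The 24 sequential guarded str.replace full-string scans over an inline dict literal are replaced by a mapping parsed from one embedded text table plus a single compiled regex alternation over its keys, applied in one left-to-right re.sub pass whose callback looks up the friendly name; the three trailing literal replaces stay sequential and in order.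
import Mathlib
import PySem

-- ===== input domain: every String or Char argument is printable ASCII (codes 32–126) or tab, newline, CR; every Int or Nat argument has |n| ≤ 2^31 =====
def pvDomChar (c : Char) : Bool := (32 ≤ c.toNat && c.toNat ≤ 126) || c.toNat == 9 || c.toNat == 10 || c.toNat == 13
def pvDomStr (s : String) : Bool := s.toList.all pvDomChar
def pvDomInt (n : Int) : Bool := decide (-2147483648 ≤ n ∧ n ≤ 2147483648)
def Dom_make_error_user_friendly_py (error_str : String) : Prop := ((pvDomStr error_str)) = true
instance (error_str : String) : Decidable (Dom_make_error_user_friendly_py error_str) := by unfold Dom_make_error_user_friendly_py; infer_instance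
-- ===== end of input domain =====

-- B replaces A's 24 sequential guarded full-string replace scans over an inline dict
-- literal by a mapping parsed from one embedded text table and a single left-to-right
-- multi-pattern pass (a compiled regex alternation in Python); same return value.


-- ===== PORT A =====
-- A's dict literal `field_mappings` (all 24 keys distinct, so `.items()` is exactly this
-- list in insertion order)
def pvFieldMappings : List (String × String) := [
  ("load.loadNumber", "Load Number"),
  ("load.mode", "Transportation Mode (FTL/LTL)"),
  ("load.rateType", "Rate Type (Spot/Contract)"),
  ("load.status", "Load Status"),
  ("load.route.0.address.street1", "Pickup Address"),
  ("load.route.0.address.city", "Pickup City"),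
  ("load.route.0.address.stateOrProvince", "Pickup State"),
  ("load.route.0.address.postalCode", "Pickup ZIP Code"),
  ("load.route.0.address.country", "Pickup Country"),
  ("load.route.0.expectedArrivalWindowStart", "Pickup Date/Time"),
  ("load.route.0.expectedArrivalWindowEnd", "Pickup Window End"),
  ("load.route.1.address.street1", "Delivery Address"),
  ("load.route.1.address.city", "Delivery City"),
  ("load.route.1.address.stateOrProvince", "Delivery State"),
  ("load.route.1.address.postalCode", "Delivery ZIP Code"),
  ("load.route.1.expectedArrivalWindowStart", "Delivery Date/Time"),
  ("customer.customerId", "Customer ID"),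
  ("customer.name", "Customer Name"),
  ("load.items.0.quantity", "Item Quantity"),
  ("load.items.0.totalWeightLbs", "Total Weight (lbs)"),
  ("bidCriteria.targetCostUsd", "Target Cost ($)"),
  ("carrier.name", "Carrier Name"),
  ("carrier.dotNumber", "DOT Number"),
  ("carrier.mcNumber", "MC Number")]

-- the `for technical_name, friendly_name in field_mappings.items():` loop with its
-- `if technical_name in user_friendly:` guard, then the three literal replaces, in order
def make_error_user_friendly_py (error_str : String) : String :=
  let user_friendly := pvFieldMappings.foldl
    (fun user_friendly p =>
      if PySem.Str.isIn p.1 user_friendly then PySem.Str.replace user_friendly p.1 p.2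
      else user_friendly) error_str
  let user_friendly := PySem.Str.replace user_friendly "Missing required field:" "Missing:"
  let user_friendly := PySem.Str.replace user_friendly "Invalid value" "Invalid value in"
  let user_friendly := PySem.Str.replace user_friendly "Valid values:" "Accepted values:"
  user_friendly

-- ===== PORT B =====
-- Source B's `_TABLE`: the field-name table as 'technical=friendly' lines
def pvTableLines : List String := [
  "load.loadNumber=Load Number",
  "load.mode=Transportation Mode (FTL/LTL)",
  "load.rateType=Rate Type (Spot/Contract)",
  "load.status=Load Status",
  "load.route.0.address.street1=Pickup Address",
  "load.route.0.address.city=Pickup City",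
  "load.route.0.address.stateOrProvince=Pickup State",
  "load.route.0.address.postalCode=Pickup ZIP Code",
  "load.route.0.address.country=Pickup Country",
  "load.route.0.expectedArrivalWindowStart=Pickup Date/Time",
  "load.route.0.expectedArrivalWindowEnd=Pickup Window End",
  "load.route.1.address.street1=Delivery Address",
  "load.route.1.address.city=Delivery City",
  "load.route.1.address.stateOrProvince=Delivery State",
  "load.route.1.address.postalCode=Delivery ZIP Code",
  "load.route.1.expectedArrivalWindowStart=Delivery Date/Time",
  "customer.customerId=Customer ID",
  "customer.name=Customer Name",
  "load.items.0.quantity=Item Quantity",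
  "load.items.0.totalWeightLbs=Total Weight (lbs)",
  "bidCriteria.targetCostUsd=Target Cost ($)",
  "carrier.name=Carrier Name",
  "carrier.dotNumber=DOT Number",
  "carrier.mcNumber=MC Number"]

-- hand port of `line.partition('=')` (PySem has no `partition`), keeping the pieces Source B
-- keeps: the text before the first '=' and the text after it. Exact for these lines:
-- every line contains '=', so Python's (before, '=', after) triple always has the
-- separator, and Source B discards the middle component.
def pvPartitionEq : List Char → (List Char × List Char)
  | [] => ([], [])
  | c :: t => if c = '=' then ([], t) else
      let (k, v) := pvPartitionEq t
      (c :: k, v)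

-- the `for _line in _TABLE:` parse loop building `_FIELD_MAPPINGS`, combined with
-- `_FIELD_RE = re.compile('|'.join(re.escape(k) for k in _FIELD_MAPPINGS))`:
-- the alternation's alternatives (in dict = table order; all keys distinct) paired
-- with their replacement values, over code points
def pvPatterns : List (List Char × List Char) :=
  pvTableLines.map (fun line => pvPartitionEq line.toList)

theorem pv_drop_len_le (n : Nat) (l : List Char) : (l.drop n).length ≤ l.length := by simp

-- hand port of `_FIELD_RE.sub(lambda m: _FIELD_MAPPINGS[m.group(0)], error_str)`: one
-- left-to-right pass; at each position the first alternative that matches (Python `re`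
-- alternation semantics) is replaced by its friendly name and the scan resumes after it.
-- Exact: `re.escape` makes every alternative a literal, so alternative kv matches at a
-- position iff kv.1 is a prefix of the remaining text, and the callback returns the
-- dict value kv.2 paired with it.
def pvMultiSub (ps : List (List Char × List Char)) : List Char → List Char
  | [] => []
  | c :: t =>
    match ps.find? (fun p => p.1.isPrefixOf (c :: t)) with
    | some kv => kv.2 ++ pvMultiSub ps (t.drop (kv.1.length - 1))
    | none => c :: pvMultiSub ps t
termination_by l => l.length
decreasing_by
  · exact Nat.lt_succ_of_le (pv_drop_len_le ..)
  · simp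

def make_error_user_friendly_py_alt (error_str : String) : String :=
  let user_friendly := String.ofList (pvMultiSub pvPatterns error_str.toList)
  let user_friendly := PySem.Str.replace user_friendly "Missing required field:" "Missing:"
  let user_friendly := PySem.Str.replace user_friendly "Invalid value" "Invalid value in"
  let user_friendly := PySem.Str.replace user_friendly "Valid values:" "Accepted values:"
  user_friendly

-- ===== PRECONDITION & SPEC =====
def Spec_make_error_user_friendly_py (error_str : String) (out : String) : Prop := out = make_error_user_friendly_py_alt error_str
instance (error_str : String) (out : String) : Decidable (Spec_make_error_user_friendly_py error_str out) := by unfold Spec_make_error_user_friendly_py; infer_instance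

-- ===== CLAIM (what is proved, stated in full; the proofs are below) =====
def Claim_equal_make_error_user_friendly_py : Prop := ∀ (error_str : String), Dom_make_error_user_friendly_py error_str → Spec_make_error_user_friendly_py error_str (make_error_user_friendly_py error_str)

-- ===== LEMMAS AND PROOFS =====

-- B's parsed table, evaluated: exactly A's table on the char level
set_option maxRecDepth 40000 in
set_option maxHeartbeats 1000000 in
theorem pv_patterns_eq :
    pvFieldMappings.map (fun p => (p.1.toList, p.2.toList)) = pvPatterns := by decide

-- Python's s.replace(old, new) for nonempty old, as plain well-founded recursion
-- (leftmost match, skip past the replacement): proof-side view of PySem.Chars.replace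
def pvRep1 (old new : List Char) : List Char → List Char
  | [] => []
  | c :: t =>
    if old.isPrefixOf (c :: t) then new ++ pvRep1 old new (t.drop (old.length - 1))
    else c :: pvRep1 old new t
termination_by l => l.length
decreasing_by
  · exact Nat.lt_succ_of_le (pv_drop_len_le ..)
  · simp

theorem pv_drop_cons (old : List Char) (h : old ≠ []) (c : Char) (t : List Char) :
    List.drop old.length (c :: t) = t.drop (old.length - 1) := by
  cases old with
  | nil => exact absurd rfl h
  | cons o os => simp

theorem pv_go_eq (old new : List Char) (h : old ≠ []) :
    ∀ (fuel : Nat) (l acc : List Char), l.length ≤ fuel →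
      PySem.Chars.replace.go old new fuel l acc = acc.reverse ++ pvRep1 old new l := by
  intro fuel
  induction fuel with
  | zero =>
    intro l acc hl
    have : l = [] := List.eq_nil_of_length_eq_zero (Nat.le_zero.mp hl)
    subst this
    simp [PySem.Chars.replace.go, pvRep1]
  | succ n ih =>
    intro l acc hl
    match l with
    | [] => simp [PySem.Chars.replace.go, pvRep1]
    | c :: t =>
      rw [PySem.Chars.replace.go]
      by_cases hp : old.isPrefixOf (c :: t) = true
      · rw [if_pos hp, pv_drop_cons old h,
          ih _ _ (le_trans (pv_drop_len_le ..) (Nat.le_of_succ_le_succ (by simpa using hl)))]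
        rw [pvRep1, if_pos hp]
        simp
      · rw [if_neg hp, ih _ _ (Nat.le_of_succ_le_succ (by simpa using hl))]
        rw [pvRep1, if_neg hp]
        simp

theorem pv_replace_eq_rep1 (s old new : List Char) (h : old ≠ []) :
    PySem.Chars.replace s old new = pvRep1 old new s := by
  rw [PySem.Chars.replace, if_neg (by simpa using h)]
  simpa using pv_go_eq old new h s.length s [] le_rfl

theorem pv_rep1_no_occ (old new s : List Char) (h : ¬ old <:+: s) :
    pvRep1 old new s = s := by
  fun_induction pvRep1 old new s with
  | case1 => rfl
  | case2 c t hp ih =>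
    exact absurd ((List.isPrefixOf_iff_prefix.mp hp).isInfix) h
  | case3 c t hp ih =>
    rw [ih (fun hi => h (List.infix_cons hi))]

-- "no match of p starts strictly inside a (whatever follows a)"
abbrev pvPT (a p : List Char) : Prop :=
  ∀ j, j < a.length → ¬ (a.drop j <+: p) ∧ ¬ (p <+: a.drop j)

theorem pv_pt_shift (c : Char) (a p : List Char) (h : pvPT (c :: a) p) : pvPT a p := by
  intro j hj
  simpa using h (j + 1) (by simpa using hj)

theorem pv_prefix_split (p a b : List Char) (h : p <+: a ++ b) : a <+: p ∨ p <+: a := by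
  rcases List.prefix_or_prefix_of_prefix h (List.prefix_append a b) with h1 | h1
  · exact Or.inr h1
  · exact Or.inl h1

theorem pv_rep1_append (p v a b : List Char) (hPT : pvPT a p) :
    pvRep1 p v (a ++ b) = a ++ pvRep1 p v b := by
  induction a with
  | nil => simp
  | cons c a' ih =>
    have hnp : ¬ p.isPrefixOf (c :: (a' ++ b)) = true := by
      intro hp
      have hp' : p <+: (c :: a') ++ b := by simpa using List.isPrefixOf_iff_prefix.mp hp
      rcases pv_prefix_split p (c :: a') b hp' with h1 | h1
      · exact (hPT 0 (by simp)).1 (by simpa using h1)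
      · exact (hPT 0 (by simp)).2 (by simpa using h1)
    rw [List.cons_append, pvRep1, if_neg hnp, ih (pv_pt_shift c a' p hPT)]
    rfl

theorem pv_rep1_head (p v u : List Char) (h : p ≠ []) :
    pvRep1 p v (p ++ u) = v ++ pvRep1 p v u := by
  cases p with
  | nil => exact absurd rfl h
  | cons o os =>
    rw [List.cons_append, pvRep1,
      if_pos (List.isPrefixOf_iff_prefix.mpr (by simp))]
    simp

-- A's loop, on the char level: sequential replaces in table order
def pvSeqRep (ps : List (List Char × List Char)) (s : List Char) : List Char :=
  ps.foldl (fun t q => pvRep1 q.1 q.2 t) s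

theorem pv_seqRep_nil (ps : List (List Char × List Char)) : pvSeqRep ps [] = [] := by
  induction ps with
  | nil => rfl
  | cons q L ih => simpa [pvSeqRep, pvRep1] using ih

theorem pv_seqRep_append_list (L1 L2 : List (List Char × List Char)) (s : List Char) :
    pvSeqRep (L1 ++ L2) s = pvSeqRep L2 (pvSeqRep L1 s) := by
  simp [pvSeqRep, List.foldl_append]

theorem pv_seq_append (L : List (List Char × List Char)) (a b : List Char)
    (h : ∀ q ∈ L, pvPT a q.1) : pvSeqRep L (a ++ b) = a ++ pvSeqRep L b := by
  induction L generalizing b with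
  | nil => rfl
  | cons q L' ih =>
    have h1 : pvSeqRep (q :: L') (a ++ b) = pvSeqRep L' (pvRep1 q.1 q.2 (a ++ b)) := rfl
    rw [h1, pv_rep1_append q.1 q.2 a b (h q (by simp)),
      ih (pvRep1 q.1 q.2 b) (fun r hr => h r (List.mem_cons_of_mem q hr))]
    rfl

-- the four facts about the parsed table the equivalence rests on, checked by decide:
-- keys are nonempty; no key-match can start strictly inside another key occurrence;
-- none can start inside a substituted friendly value; and no proper suffix of a key is
-- prefix-compatible with a friendly value
set_option maxHeartbeats 1000000 in
set_option maxRecDepth 40000 in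
theorem pv_hNE : ∀ p ∈ pvPatterns, p.1 ≠ [] := by rw [← pv_patterns_eq]; decide

set_option maxHeartbeats 4000000 in
set_option maxRecDepth 40000 in
theorem pv_hKK : ∀ p ∈ pvPatterns, ∀ q ∈ pvPatterns, p.1 ≠ q.1 → pvPT p.1 q.1 := by rw [← pv_patterns_eq]; decide

set_option maxHeartbeats 4000000 in
set_option maxRecDepth 40000 in
theorem pv_hVK : ∀ p ∈ pvPatterns, ∀ q ∈ pvPatterns, pvPT p.2 q.1 := by rw [← pv_patterns_eq]; decide

set_option maxHeartbeats 4000000 in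
set_option maxRecDepth 40000 in
theorem pv_hKV : ∀ p ∈ pvPatterns, ∀ q ∈ pvPatterns, ∀ j, j < p.1.length → 0 < j →
    ¬ (p.1.drop j <+: q.2) ∧ ¬ (q.2 <+: p.1.drop j) := by rw [← pv_patterns_eq]; decide

-- the scanner's output equals its input up to the first match; from there it is
-- friendly-value ++ rescan of the rest
theorem pv_agree (ps : List (List Char × List Char)) (hne : ∀ q ∈ ps, q.1 ≠ [])
    (s : List Char) :
    pvMultiSub ps s = s ∨ ∃ j kv, kv ∈ ps ∧ kv.1 <+: s.drop j ∧
      (pvMultiSub ps s).take j = s.take j ∧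
      pvMultiSub ps s = s.take j ++ kv.2 ++ pvMultiSub ps (s.drop (j + kv.1.length)) := by
  fun_induction pvMultiSub ps s with
  | case1 => exact Or.inl rfl
  | case2 c t kv hfind ih =>
    right
    have hmem : kv ∈ ps := List.mem_of_find?_eq_some hfind
    have hpred : kv.1.isPrefixOf (c :: t) = true := by
      simpa using (List.find?_eq_some_iff_append.mp hfind).1
    have hkvne : kv.1 ≠ [] := hne kv hmem
    refine ⟨0, kv, hmem, by simpa using List.isPrefixOf_iff_prefix.mp hpred, by simp, ?_⟩
    simp [pv_drop_cons kv.1 hkvne]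
  | case3 c t hfind ih =>
    rcases ih with h | ⟨j, kv, hmem, hpref, htake, heqn⟩
    · exact Or.inl (by rw [h])
    · right
      refine ⟨j + 1, kv, hmem, by simpa using hpref, ?_, ?_⟩
      · simp [htake]
      · have harith : j + 1 + kv.1.length = (j + kv.1.length) + 1 := by omega
        rw [harith, List.drop_succ_cons, heqn]
        simp

-- if no alternative matches at the head of c :: t, then a pattern that did not match
-- there cannot match at the head of c :: (scanned t) either
theorem pv_scanhead (p : List Char × List Char) (hp : p ∈ pvPatterns)
    (ps : List (List Char × List Char)) (hsub : ∀ q ∈ ps, q ∈ pvPatterns)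
    (c : Char) (t : List Char) (hphead : ¬ p.1 <+: (c :: t)) :
    ¬ p.1 <+: (c :: pvMultiSub ps t) := by
  intro hpre
  have hne : ∀ q ∈ ps, q.1 ≠ [] := fun q hq => pv_hNE q (hsub q hq)
  cases hp1 : p.1 with
  | nil => exact hphead (by simp [hp1])
  | cons d r =>
    rw [hp1] at hpre
    obtain ⟨hdc, hr⟩ := List.cons_prefix_cons.mp hpre
    subst hdc
    rcases pv_agree ps hne t with hX | ⟨j, kv, hmem, hprefkv, htake, heqn⟩
    · rw [hX] at hr
      exact hphead (by rw [hp1]; exact List.cons_prefix_cons.mpr ⟨rfl, hr⟩)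
    · by_cases hle : r.length ≤ j
      · have hrt : r = t.take r.length := by
          have h1 := List.prefix_iff_eq_take.mp hr
          calc r = ((pvMultiSub ps t).take j).take r.length := by
                rw [List.take_take, min_eq_left hle]
                exact h1
            _ = (t.take j).take r.length := by rw [htake]
            _ = t.take r.length := by rw [List.take_take, min_eq_left hle]
        have : r <+: t := by rw [hrt]; exact List.take_prefix ..
        exact hphead (by rw [hp1]; exact List.cons_prefix_cons.mpr ⟨rfl, this⟩)
      · push Not at hle
        have hkvne : kv.1 ≠ [] := hne kv hmem
        have hjt : j < t.length := by
          by_contra hjt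
          push Not at hjt
          rw [List.drop_eq_nil_of_le hjt] at hprefkv
          exact hkvne (List.prefix_nil.mp hprefkv)
        have hXdrop : (pvMultiSub ps t).drop j =
            kv.2 ++ pvMultiSub ps (t.drop (j + kv.1.length)) := by
          rw [heqn, List.append_assoc, List.drop_append_of_le_length (by simp; omega)]
          simp
        have hrd : r.drop j <+: kv.2 ++ pvMultiSub ps (t.drop (j + kv.1.length)) := by
          rw [← hXdrop]
          exact hr.drop j
        have hC5 := pv_hKV p hp kv (hsub kv hmem) (j + 1) (by rw [hp1]; simpa using hle)
          (by omega)
        rw [hp1, List.drop_succ_cons] at hC5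
        rcases pv_prefix_split (r.drop j) kv.2 _ hrd with h1 | h1
        · exact hC5.2 h1
        · exact hC5.1 h1

-- MAIN INVARIANT: A's sequential replaces equal one multi-pattern pass, for any
-- sub-collection of the table's entries
theorem pv_main : ∀ (n : Nat) (ps : List (List Char × List Char)),
    (∀ q ∈ ps, q ∈ pvPatterns) → ∀ (s : List Char), s.length ≤ n →
    pvSeqRep ps s = pvMultiSub ps s := by
  intro n
  induction n with
  | zero =>
    intro ps hps s hs
    have : s = [] := List.eq_nil_of_length_eq_zero (Nat.le_zero.mp hs)
    subst this
    rw [pv_seqRep_nil, pvMultiSub]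
  | succ n ih =>
    intro ps hps s hs
    match s with
    | [] => rw [pv_seqRep_nil, pvMultiSub]
    | c :: t =>
      have ht : t.length ≤ n := by simpa using hs
      cases hfind : ps.find? (fun p => p.1.isPrefixOf (c :: t)) with
      | some kv =>
        obtain ⟨hkvpred, Q1, Q2, hsplit, hQ1⟩ := List.find?_eq_some_iff_append.mp hfind
        have hkvmem : kv ∈ ps := List.mem_of_find?_eq_some hfind
        have hkvP : kv ∈ pvPatterns := hps kv hkvmem
        have hkvne : kv.1 ≠ [] := pv_hNE kv hkvP
        have hpre : kv.1 <+: (c :: t) := List.isPrefixOf_iff_prefix.mp hkvpred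
        have hseq : (c :: t) = kv.1 ++ (c :: t).drop kv.1.length := by
          conv_lhs => rw [← List.take_append_drop kv.1.length (c :: t)]
          rw [← List.prefix_iff_eq_take.mp hpre]
        set t' := (c :: t).drop kv.1.length with ht'
        have ht'len : t'.length ≤ n := by
          rw [ht']
          have h1 : 1 ≤ kv.1.length := List.length_pos_iff.mpr hkvne
          simp only [List.length_drop, List.length_cons]
          omega
        have hPT1 : ∀ q ∈ Q1, pvPT kv.1 q.1 := by
          intro q hq
          have hqps : q ∈ ps := by rw [hsplit]; simp [hq]
          have hqne : q.1 ≠ kv.1 := by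
            intro hqe
            have hq1 := hQ1 q hq
            rw [hqe] at hq1
            simp [hkvpred] at hq1
          exact pv_hKK kv hkvP q (hps q hqps) (fun he => hqne he.symm)
        have hPT2 : ∀ q ∈ Q2, pvPT kv.2 q.1 := by
          intro q hq
          have hqps : q ∈ ps := by rw [hsplit]; simp [hq]
          exact pv_hVK kv hkvP q (hps q hqps)
        calc pvSeqRep ps (c :: t)
            = pvSeqRep Q2 (pvRep1 kv.1 kv.2 (pvSeqRep Q1 (kv.1 ++ t'))) := by
              rw [hsplit, ← hseq]
              rw [pv_seqRep_append_list]
              rfl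
          _ = pvSeqRep Q2 (pvRep1 kv.1 kv.2 (kv.1 ++ pvSeqRep Q1 t')) := by
              rw [pv_seq_append Q1 kv.1 t' hPT1]
          _ = pvSeqRep Q2 (kv.2 ++ pvRep1 kv.1 kv.2 (pvSeqRep Q1 t')) := by
              rw [pv_rep1_head kv.1 kv.2 _ hkvne]
          _ = kv.2 ++ pvSeqRep Q2 (pvRep1 kv.1 kv.2 (pvSeqRep Q1 t')) := by
              rw [pv_seq_append Q2 kv.2 _ hPT2]
          _ = kv.2 ++ pvSeqRep ps t' := by
              rw [hsplit, pv_seqRep_append_list]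
              rfl
          _ = kv.2 ++ pvMultiSub ps t' := by rw [ih ps hps t' ht'len]
          _ = pvMultiSub ps (c :: t) := by
              rw [pvMultiSub, hfind, ht', pv_drop_cons kv.1 hkvne]
      | none =>
        have hno : ∀ q ∈ ps, ¬ q.1 <+: (c :: t) :=
          fun q hq hpre =>
            List.find?_eq_none.mp hfind q hq (List.isPrefixOf_iff_prefix.mpr hpre)
        have hinner : ∀ (L : List (List Char × List Char)), (∀ q ∈ L, q ∈ ps) →
            pvSeqRep L (c :: t) = c :: pvSeqRep L t := by
          intro L
          induction L using List.reverseRecOn with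
          | nil => intro _; rfl
          | append_singleton L' q ihL =>
            intro hL
            have hL' : ∀ r ∈ L', r ∈ ps := fun r hr => hL r (by simp [hr])
            have hqps : q ∈ ps := hL q (by simp)
            have hL'P : ∀ r ∈ L', r ∈ pvPatterns := fun r hr => hps r (hL' r hr)
            have hstep : ∀ x, pvSeqRep (L' ++ [q]) x = pvRep1 q.1 q.2 (pvSeqRep L' x) := by
              intro x
              rw [pv_seqRep_append_list]
              rfl
            rw [hstep, ihL hL', ih L' hL'P t ht]
            have hnohead := pv_scanhead q (hps q hqps) L' hL'P c t (hno q hqps)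
            rw [pvRep1, if_neg (by
              rw [List.isPrefixOf_iff_prefix]
              simpa using hnohead)]
            rw [← ih L' hL'P t ht, hstep]
        rw [hinner ps (fun q hq => hq), ih ps hps t ht, pvMultiSub, hfind]

-- bridge: A's String-level guarded loop equals pvSeqRep on the char level
theorem pv_foldA : ∀ (L : List (String × String)) (s : String),
    (∀ p ∈ L, p.1.toList ≠ []) →
    (L.foldl (fun uf p =>
        if PySem.Str.isIn p.1 uf then PySem.Str.replace uf p.1 p.2 else uf) s).toList
      = pvSeqRep (L.map (fun p => (p.1.toList, p.2.toList))) s.toList := by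
  intro L
  induction L with
  | nil => intro s _; rfl
  | cons p L' ih =>
    intro s hne
    have hpne : p.1.toList ≠ [] := hne p (by simp)
    have hstep : (if PySem.Str.isIn p.1 s then PySem.Str.replace s p.1 p.2 else s).toList
        = pvRep1 p.1.toList p.2.toList s.toList := by
      by_cases h : PySem.Str.isIn p.1 s = true
      · rw [if_pos h, PySem.Str.replace, String.toList_ofList,
          pv_replace_eq_rep1 _ _ _ hpne]
      · rw [if_neg (by simpa using h)]
        have hinf : ¬ p.1.toList <:+: s.toList := by
          intro hi
          exact h (by rw [PySem.Str.isIn_eq]; exact (PySem.Chars.isIn_iff_infix _ _).mpr hi)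
        rw [pv_rep1_no_occ _ _ _ hinf]
    have hfold : ((p :: L').foldl (fun uf p =>
        if PySem.Str.isIn p.1 uf then PySem.Str.replace uf p.1 p.2 else uf) s)
        = (L'.foldl (fun uf p =>
        if PySem.Str.isIn p.1 uf then PySem.Str.replace uf p.1 p.2 else uf)
          (if PySem.Str.isIn p.1 s then PySem.Str.replace s p.1 p.2 else s)) := rfl
    rw [hfold, ih _ (fun r hr => hne r (by simp [hr])), hstep]
    rfl

-- ===== VERDICT (by name: the statement is the Claim_ definition above) =====
theorem make_error_user_friendly_py_spec : Claim_equal_make_error_user_friendly_py := by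
  intro s _
  unfold Spec_make_error_user_friendly_py
  unfold make_error_user_friendly_py make_error_user_friendly_py_alt
  have hne : ∀ p ∈ pvFieldMappings, p.1.toList ≠ [] := by decide
  have hA := pv_foldA pvFieldMappings s hne
  rw [pv_patterns_eq] at hA
  have hmain := pv_main s.toList.length pvPatterns (fun q hq => hq) s.toList le_rfl
  have hlist : (pvFieldMappings.foldl (fun uf p =>
      if PySem.Str.isIn p.1 uf then PySem.Str.replace uf p.1 p.2 else uf) s)
      = String.ofList (pvMultiSub pvPatterns s.toList) := by
    have := hA.trans hmain
    calc (pvFieldMappings.foldl _ s)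
        = String.ofList (pvFieldMappings.foldl (fun uf p =>
            if PySem.Str.isIn p.1 uf then PySem.Str.replace uf p.1 p.2 else uf) s).toList :=
          String.ofList_toList.symm
      _ = String.ofList (pvMultiSub pvPatterns s.toList) := by rw [this]
  rw [hlist]
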